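-- pv_equiv track=rewrite | github.com/glebelg/Bioinformatics-2020 | bioAlgs.py | manhattanTourist
-- ===== SOURCE A (Python) =====
-- def manhattanTourist(n, m, down, right):
--     matrix = [[0 for x in range(m + 1)] for y in range(n + 1)]
--     matrix[0][0] = 0
--     for i in range(1, n + 1):
--         matrix[i][0] = matrix[i - 1][0] + down[i - 1][0]
--     for j in range(1, m + 1):
--         matrix[0][j] = matrix[0][j - 1] + right[0][j - 1]
--     for i in range(1, n + 1):
--         for j in range(1, m + 1):
--             matrix[i][j] = max(matrix[i - 1][j] + down[i - 1][j], matrix[i][j - 1] + right[i][j - 1])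
--     return matrix[n][m]
-- ===== SOURCE B (Python) =====
-- def manhattanTourist(n, m, down, right):
--     # top-down memoized evaluation of the path recurrence, with an explicit
--     # stack instead of recursion (no depth limit)
--     memo = {}
--     stack = [(n, m)]
--     while stack:
--         i, j = stack[-1]
--         if (i, j) in memo:
--             stack.pop()
--             continue
--         if i == 0 and j == 0:
--             memo[(i, j)] = 0
--             stack.pop()
--             continue
--         if j == 0:
--             if (i - 1, 0) in memo:
--                 memo[(i, j)] = memo[(i - 1, 0)] + down[i - 1][0]
--                 stack.pop()
--             else:
--                 stack.append((i - 1, 0))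
--             continue
--         if i == 0:
--             if (0, j - 1) in memo:
--                 memo[(i, j)] = memo[(0, j - 1)] + right[0][j - 1]
--                 stack.pop()
--             else:
--                 stack.append((0, j - 1))
--             continue
--         up = memo.get((i - 1, j))
--         left = memo.get((i, j - 1))
--         if up is not None and left is not None:
--             memo[(i, j)] = max(up + down[i - 1][j], left + right[i][j - 1])
--             stack.pop()
--         else:
--             if up is None:
--                 stack.append((i - 1, j))
--             if left is None:
--                 stack.append((i, j - 1))
--     return memo[(n, m)]
-- ===== Notes on version B (the rewrite author's own statement) =====
-- stated objective: alternative
-- what changed: B replaces A's bottom-up table-filling loops with top-down memoized evaluation of the path recurrence, driven by an explicit worklist stack (demand-driven DFS over cells) instead of row/column iteration over a 2D array.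
import Mathlib
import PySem

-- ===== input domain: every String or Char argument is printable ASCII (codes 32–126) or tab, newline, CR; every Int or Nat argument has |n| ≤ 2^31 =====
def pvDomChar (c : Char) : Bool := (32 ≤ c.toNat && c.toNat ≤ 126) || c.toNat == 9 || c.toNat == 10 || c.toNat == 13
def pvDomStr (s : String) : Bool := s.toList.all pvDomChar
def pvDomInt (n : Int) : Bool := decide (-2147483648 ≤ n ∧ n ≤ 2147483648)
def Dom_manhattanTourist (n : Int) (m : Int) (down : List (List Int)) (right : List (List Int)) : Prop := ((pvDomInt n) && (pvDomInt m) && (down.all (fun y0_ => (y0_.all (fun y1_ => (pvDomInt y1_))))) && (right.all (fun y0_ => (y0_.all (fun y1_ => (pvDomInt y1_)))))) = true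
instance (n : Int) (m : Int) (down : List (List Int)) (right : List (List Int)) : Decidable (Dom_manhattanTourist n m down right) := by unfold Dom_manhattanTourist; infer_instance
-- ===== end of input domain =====

-- B replaces A's bottom-up table-filling loops with top-down memoized evaluation of the
-- recurrence driven by an explicit worklist stack; same values on Pre_.

-- ===== PORT A =====
def pvG2 (xs : List (List Int)) (i j : Int) : Int :=
  PySem.List.pyGetD (PySem.List.pyGetD xs i []) j 0

def pvS2 (xs : List (List Int)) (i j : Int) (v : Int) : List (List Int) :=
  PySem.List.pySetD xs i (PySem.List.pySetD (PySem.List.pyGetD xs i []) j v)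

def manhattanTourist (n : Int) (m : Int) (down : List (List Int)) (right : List (List Int)) : Int :=
  let matrix : List (List Int) :=
    (PySem.List.pyRange 0 (n + 1) 1).map (fun _ => (PySem.List.pyRange 0 (m + 1) 1).map (fun _ => (0 : Int)))
  let matrix := pvS2 matrix 0 0 0
  let matrix := (PySem.List.pyRange 1 (n + 1) 1).foldl
    (fun mat i => pvS2 mat i 0 (pvG2 mat (i - 1) 0 + pvG2 down (i - 1) 0)) matrix
  let matrix := (PySem.List.pyRange 1 (m + 1) 1).foldl
    (fun mat j => pvS2 mat 0 j (pvG2 mat 0 (j - 1) + pvG2 right 0 (j - 1))) matrix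
  let matrix := (PySem.List.pyRange 1 (n + 1) 1).foldl
    (fun mat i => (PySem.List.pyRange 1 (m + 1) 1).foldl
      (fun mat j => pvS2 mat i j
        (max (pvG2 mat (i - 1) j + pvG2 down (i - 1) j)
             (pvG2 mat i (j - 1) + pvG2 right i (j - 1)))) mat) matrix
  pvG2 matrix n m


-- ===== PORT B =====
-- Source B's while-loop over the explicit stack; the Python stack's TOP (its last element)
-- is the list HEAD here, so append = cons and stack[-1]/pop = head/tail — same discipline,
-- same visit order.  The loop is bounded by fuel (a guard making the recursion total; on
-- Pre_ inputs the stack empties long before the fuel runs out, see `pvResolve` below).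
def pvLoop (down right : List (List Int)) :
    Nat → PySem.Dict (Int × Int) Int → List (Int × Int) → PySem.Dict (Int × Int) Int
  | 0, memo, _ => memo
  | _ + 1, memo, [] => memo
  | fuel + 1, memo, (i, j) :: rest =>
    match memo.get? (i, j) with
    | some _ => pvLoop down right fuel memo rest
    | none =>
      if i = 0 ∧ j = 0 then pvLoop down right fuel (memo.insert (i, j) 0) rest
      else if j = 0 then
        match memo.get? (i - 1, 0) with
        | some v => pvLoop down right fuel (memo.insert (i, j) (v + pvG2 down (i - 1) 0)) rest
        | none => pvLoop down right fuel memo ((i - 1, 0) :: (i, j) :: rest)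
      else if i = 0 then
        match memo.get? (0, j - 1) with
        | some v => pvLoop down right fuel (memo.insert (i, j) (v + pvG2 right 0 (j - 1))) rest
        | none => pvLoop down right fuel memo ((0, j - 1) :: (i, j) :: rest)
      else
        match memo.get? (i - 1, j), memo.get? (i, j - 1) with
        | some u, some l =>
            pvLoop down right fuel
              (memo.insert (i, j) (max (u + pvG2 down (i - 1) j) (l + pvG2 right i (j - 1)))) rest
        | none, some _ => pvLoop down right fuel memo ((i - 1, j) :: (i, j) :: rest)
        | some _, none => pvLoop down right fuel memo ((i, j - 1) :: (i, j) :: rest)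
        | none, none => pvLoop down right fuel memo ((i, j - 1) :: (i - 1, j) :: (i, j) :: rest)

-- memo[(n, m)] at the end: on Pre_ inputs the key is always present, so getD 0 is exact there.
def manhattanTourist_alt (n : Int) (m : Int) (down : List (List Int)) (right : List (List Int)) : Int :=
  (pvLoop down right (3 ^ (n.toNat + m.toNat + 1)) PySem.Dict.empty [(n, m)]).getD (n, m) 0


-- ===== PRECONDITION & SPEC =====
-- Pre_: exactly the inputs on which Python A returns (no IndexError): n, m ≥ 0, the first n
-- rows of `down` exist with length ≥ m+1, and (when m ≥ 1) the first n+1 rows of `right`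
-- exist with length ≥ m.
def Pre_manhattanTourist (n : Int) (m : Int) (down : List (List Int)) (right : List (List Int)) : Prop :=
  0 ≤ n ∧ 0 ≤ m ∧ n.toNat ≤ down.length ∧
  (∀ r ∈ down.take n.toNat, m.toNat + 1 ≤ r.length) ∧
  (1 ≤ m → n.toNat + 1 ≤ right.length ∧ ∀ r ∈ right.take (n.toNat + 1), m.toNat ≤ r.length)
instance (n : Int) (m : Int) (down : List (List Int)) (right : List (List Int)) : Decidable (Pre_manhattanTourist n m down right) := by unfold Pre_manhattanTourist; infer_instance

def pvWitness_manhattanTourist : Int × Int × List (List Int) × List (List Int) :=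
  (1, 1, [[1, 2]], [[3], [4]])

def Spec_manhattanTourist (n : Int) (m : Int) (down : List (List Int)) (right : List (List Int)) (out : Int) : Prop := out = manhattanTourist_alt n m down right
instance (n : Int) (m : Int) (down : List (List Int)) (right : List (List Int)) (out : Int) : Decidable (Spec_manhattanTourist n m down right out) := by unfold Spec_manhattanTourist; infer_instance

-- ===== CLAIM (what is proved, stated in full; the proofs are below) =====
def Claim_equal_manhattanTourist : Prop := ∀ (n : Int) (m : Int) (down : List (List Int)) (right : List (List Int)), Dom_manhattanTourist n m down right → Pre_manhattanTourist n m down right → Spec_manhattanTourist n m down right (manhattanTourist n m down right)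

-- ===== LEMMAS AND PROOFS =====

-- the shared DP recurrence: pvBest i j is the max path weight to cell (i, j)
def pvBest (down right : List (List Int)) : Nat → Nat → Int
  | 0, 0 => 0
  | i + 1, 0 => pvBest down right i 0 + pvG2 down i 0
  | 0, j + 1 => pvBest down right 0 j + pvG2 right 0 j
  | i + 1, j + 1 =>
      max (pvBest down right i (j + 1) + pvG2 down i (j + 1))
          (pvBest down right (i + 1) j + pvG2 right (i + 1) j)
termination_by i j => (i, j)

lemma getD_map_range' {α} (f : ℕ → α) {N t : ℕ} (d : α) (h : t < N) :
    ((List.range N).map f).getD t d = f t := by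
  rw [List.getD_eq_getElem?_getD]; simp [h]

lemma foldl_range_inv {α} (f : α → ℕ → α) (g : ℕ → α) (N : ℕ)
    (hstep : ∀ k, k < N → f (g k) k = g (k + 1)) :
    (List.range N).foldl f (g 0) = g N := by
  induction N with
  | zero => simp
  | succ n ih =>
      rw [List.range_succ, List.foldl_append,
        ih (fun k hk => hstep k (Nat.lt_succ_of_lt hk))]
      simpa using hstep n (Nat.lt_succ_self n)

lemma pyRange_zero_nat (N : ℕ) : PySem.List.pyRange 0 (N:Int) 1 = (List.range N).map (fun k : ℕ => (k:Int)) := by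
  rw [PySem.List.pyRange_one]
  have h : ((N:Int) - 0).toNat = N := by simp
  rw [h]
  exact List.map_congr_left (fun a _ => by ring)

lemma pyRange_one_nat (N : ℕ) : PySem.List.pyRange 1 ((N:Int)+1) 1 = (List.range N).map (fun k : ℕ => 1 + (k:Int)) := by
  rw [PySem.List.pyRange_one]
  have h : ((N:Int) + 1 - 1).toNat = N := by simp
  rw [h]

def rowS (down right : List (List Int)) (M i : Nat) : List Int :=
  (List.range (M + 1)).map (fun j => pvBest down right i j)

-- ===== B-side proof: the worklist loop computes pvBest =====

-- every value the memo holds (at a Nat-pair key) is the correct pvBest value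
def MInv (down right : List (List Int)) (memo : PySem.Dict (Int × Int) Int) : Prop :=
  ∀ (a b : Nat) (v : Int), memo.get? ((a : Int), (b : Int)) = some v → v = pvBest down right a b

lemma MInv_insert {down right : List (List Int)} {memo : PySem.Dict (Int × Int) Int}
    (h : MInv down right memo) (a b : Nat) {v : Int} (hv : v = pvBest down right a b) :
    MInv down right (memo.insert ((a : Int), (b : Int)) v) := by
  intro x y w hw
  rw [PySem.Dict.get?_insert] at hw
  split at hw
  · next heq =>
      rw [Prod.mk.injEq] at heq
      obtain ⟨hx, hy⟩ := heq
      cases hw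
      have hx' : x = a := by exact_mod_cast hx
      have hy' : y = b := by exact_mod_cast hy
      subst hx'; subst hy'; exact hv
  · exact h x y w hw

lemma get?_mono_insert {memo : PySem.Dict (Int × Int) Int} {k : Int × Int} {v : Int}
    (hk : memo.get? k = none) :
    ∀ k' v', memo.get? k' = some v' → (memo.insert k v).get? k' = some v' := by
  intro k' v' h
  rw [PySem.Dict.get?_insert]
  split
  · next heq => rw [heq, hk] at h; cases h
  · exact h

lemma pvLoop_nil (down right : List (List Int)) (f : Nat) (memo : PySem.Dict (Int × Int) Int) :
    pvLoop down right f memo [] = memo := by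
  cases f <;> rfl

-- one-step unfolding lemmas for pvLoop, one per branch of the loop body
lemma pvStep_hit {down right : List (List Int)} {memo : PySem.Dict (Int × Int) Int}
    {i j v : Int} {rest : List (Int × Int)} (fuel : Nat)
    (hget : memo.get? (i, j) = some v) :
    pvLoop down right (fuel + 1) memo ((i, j) :: rest) = pvLoop down right fuel memo rest := by
  simp only [pvLoop, hget]

lemma pvStep_origin {down right : List (List Int)} {memo : PySem.Dict (Int × Int) Int}
    {i j : Int} {rest : List (Int × Int)} (fuel : Nat)
    (hget : memo.get? (i, j) = none) (hij : i = 0 ∧ j = 0) :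
    pvLoop down right (fuel + 1) memo ((i, j) :: rest)
      = pvLoop down right fuel (memo.insert (i, j) 0) rest := by
  simp only [pvLoop, hget, if_pos hij]

lemma pvStep_j0_some {down right : List (List Int)} {memo : PySem.Dict (Int × Int) Int}
    {i j v : Int} {rest : List (Int × Int)} (fuel : Nat)
    (hget : memo.get? (i, j) = none) (hij : ¬ (i = 0 ∧ j = 0)) (hj : j = 0)
    (hdep : memo.get? (i - 1, 0) = some v) :
    pvLoop down right (fuel + 1) memo ((i, j) :: rest)
      = pvLoop down right fuel (memo.insert (i, j) (v + pvG2 down (i - 1) 0)) rest := by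
  simp only [pvLoop, hget, if_neg hij, if_pos hj, hdep]

lemma pvStep_j0_none {down right : List (List Int)} {memo : PySem.Dict (Int × Int) Int}
    {i j : Int} {rest : List (Int × Int)} (fuel : Nat)
    (hget : memo.get? (i, j) = none) (hij : ¬ (i = 0 ∧ j = 0)) (hj : j = 0)
    (hdep : memo.get? (i - 1, 0) = none) :
    pvLoop down right (fuel + 1) memo ((i, j) :: rest)
      = pvLoop down right fuel memo ((i - 1, 0) :: (i, j) :: rest) := by
  simp only [pvLoop, hget, if_neg hij, if_pos hj, hdep]

lemma pvStep_i0_some {down right : List (List Int)} {memo : PySem.Dict (Int × Int) Int}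
    {i j v : Int} {rest : List (Int × Int)} (fuel : Nat)
    (hget : memo.get? (i, j) = none) (hij : ¬ (i = 0 ∧ j = 0)) (hj : ¬ j = 0) (hi : i = 0)
    (hdep : memo.get? (0, j - 1) = some v) :
    pvLoop down right (fuel + 1) memo ((i, j) :: rest)
      = pvLoop down right fuel (memo.insert (i, j) (v + pvG2 right 0 (j - 1))) rest := by
  simp only [pvLoop, hget, if_neg hij, if_neg hj, if_pos hi, hdep]

lemma pvStep_i0_none {down right : List (List Int)} {memo : PySem.Dict (Int × Int) Int}
    {i j : Int} {rest : List (Int × Int)} (fuel : Nat)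
    (hget : memo.get? (i, j) = none) (hij : ¬ (i = 0 ∧ j = 0)) (hj : ¬ j = 0) (hi : i = 0)
    (hdep : memo.get? (0, j - 1) = none) :
    pvLoop down right (fuel + 1) memo ((i, j) :: rest)
      = pvLoop down right fuel memo ((0, j - 1) :: (i, j) :: rest) := by
  simp only [pvLoop, hget, if_neg hij, if_neg hj, if_pos hi, hdep]

lemma pvStep_int_both {down right : List (List Int)} {memo : PySem.Dict (Int × Int) Int}
    {i j u l : Int} {rest : List (Int × Int)} (fuel : Nat)
    (hget : memo.get? (i, j) = none) (hij : ¬ (i = 0 ∧ j = 0)) (hj : ¬ j = 0) (hi : ¬ i = 0)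
    (hup : memo.get? (i - 1, j) = some u) (hleft : memo.get? (i, j - 1) = some l) :
    pvLoop down right (fuel + 1) memo ((i, j) :: rest)
      = pvLoop down right fuel
          (memo.insert (i, j) (max (u + pvG2 down (i - 1) j) (l + pvG2 right i (j - 1)))) rest := by
  simp only [pvLoop, hget, if_neg hij, if_neg hj, if_neg hi, hup, hleft]

lemma pvStep_int_upNone {down right : List (List Int)} {memo : PySem.Dict (Int × Int) Int}
    {i j l : Int} {rest : List (Int × Int)} (fuel : Nat)
    (hget : memo.get? (i, j) = none) (hij : ¬ (i = 0 ∧ j = 0)) (hj : ¬ j = 0) (hi : ¬ i = 0)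
    (hup : memo.get? (i - 1, j) = none) (hleft : memo.get? (i, j - 1) = some l) :
    pvLoop down right (fuel + 1) memo ((i, j) :: rest)
      = pvLoop down right fuel memo ((i - 1, j) :: (i, j) :: rest) := by
  simp only [pvLoop, hget, if_neg hij, if_neg hj, if_neg hi, hup, hleft]

lemma pvStep_int_leftNone {down right : List (List Int)} {memo : PySem.Dict (Int × Int) Int}
    {i j u : Int} {rest : List (Int × Int)} (fuel : Nat)
    (hget : memo.get? (i, j) = none) (hij : ¬ (i = 0 ∧ j = 0)) (hj : ¬ j = 0) (hi : ¬ i = 0)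
    (hup : memo.get? (i - 1, j) = some u) (hleft : memo.get? (i, j - 1) = none) :
    pvLoop down right (fuel + 1) memo ((i, j) :: rest)
      = pvLoop down right fuel memo ((i, j - 1) :: (i, j) :: rest) := by
  simp only [pvLoop, hget, if_neg hij, if_neg hj, if_neg hi, hup, hleft]

lemma pvStep_int_noneNone {down right : List (List Int)} {memo : PySem.Dict (Int × Int) Int}
    {i j : Int} {rest : List (Int × Int)} (fuel : Nat)
    (hget : memo.get? (i, j) = none) (hij : ¬ (i = 0 ∧ j = 0)) (hj : ¬ j = 0) (hi : ¬ i = 0)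
    (hup : memo.get? (i - 1, j) = none) (hleft : memo.get? (i, j - 1) = none) :
    pvLoop down right (fuel + 1) memo ((i, j) :: rest)
      = pvLoop down right fuel memo ((i, j - 1) :: (i - 1, j) :: (i, j) :: rest) := by
  simp only [pvLoop, hget, if_neg hij, if_neg hj, if_neg hi, hup, hleft]

lemma pow3_ge_3 (s : Nat) : 3 ≤ (3:Nat) ^ (s + 1) := by
  calc (3:Nat) = 3 ^ 1 := by norm_num
  _ ≤ 3 ^ (s + 1) := Nat.pow_le_pow_right (by norm_num) (by omega)

lemma pow3_budget (s : Nat) : (3:Nat) ^ (s + 1) + 3 ^ (s + 1) + 3 ≤ 3 ^ (s + 2) := by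
  have h : (3:Nat) ^ (s + 2) = 3 ^ (s + 1) + 3 ^ (s + 1) + 3 ^ (s + 1) := by ring
  have h1 := pow3_ge_3 s
  omega

-- resolving one cell: within < 3^(s+1) steps the loop memoizes pvBest a b and returns to rest
lemma pvResolve (down right : List (List Int)) :
    ∀ (s a b : Nat), a + b ≤ s → ∀ memo, MInv down right memo →
    ∃ (t : Nat) (memo' : PySem.Dict (Int × Int) Int),
      t + 1 ≤ 3 ^ (s + 1) ∧ MInv down right memo' ∧
      memo'.get? ((a : Int), (b : Int)) = some (pvBest down right a b) ∧
      (∀ k v, memo.get? k = some v → memo'.get? k = some v) ∧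
      ∀ rest fuel, pvLoop down right (t + fuel) memo (((a : Int), (b : Int)) :: rest)
        = pvLoop down right fuel memo' rest := by
  intro s
  induction s with
  | zero =>
      intro a b hab memo hinv
      have ha : a = 0 := by omega
      have hb : b = 0 := by omega
      subst ha; subst hb
      simp only [Nat.cast_zero]
      cases hget : memo.get? ((0 : Int), (0 : Int)) with
      | some v =>
          refine ⟨1, memo, by norm_num, hinv, ?_, fun _ _ h => h, ?_⟩
          · have hv := hinv 0 0 v (by simpa using hget)
            rw [hget, hv]
          · intro rest fuel
            rw [show (1 : Nat) + fuel = fuel + 1 by omega, pvStep_hit fuel hget]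
      | none =>
          refine ⟨1, memo.insert ((0 : Int), (0 : Int)) 0, by norm_num,
            ?_, ?_, get?_mono_insert hget, ?_⟩
          · have := MInv_insert hinv 0 0 (v := 0) (by simp [pvBest])
            simpa using this
          · rw [PySem.Dict.get?_insert_self]; simp [pvBest]
          · intro rest fuel
            rw [show (1 : Nat) + fuel = fuel + 1 by omega,
              pvStep_origin fuel hget ⟨rfl, rfl⟩]
  | succ s ih =>
      intro a b hab memo hinv
      cases hget : memo.get? (((a : Nat) : Int), ((b : Nat) : Int)) with
      | some v =>
          refine ⟨1, memo, by have := pow3_ge_3 (s + 1); omega, hinv, ?_, fun _ _ h => h, ?_⟩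
          · rw [hget, hinv a b v hget]
          · intro rest fuel
            rw [show (1 : Nat) + fuel = fuel + 1 by omega, pvStep_hit fuel hget]
      | none =>
          rcases a with _ | a'
          · rcases b with _ | b'
            · -- (0, 0): one step inserts 0
              simp only [Nat.cast_zero] at hget ⊢
              refine ⟨1, memo.insert ((0 : Int), (0 : Int)) 0,
                by have := pow3_ge_3 (s + 1); omega, ?_, ?_, get?_mono_insert hget, ?_⟩
              · have := MInv_insert hinv 0 0 (v := 0) (by simp [pvBest])
                simpa using this
              · rw [PySem.Dict.get?_insert_self]; simp [pvBest]
              · intro rest fuel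
                rw [show (1 : Nat) + fuel = fuel + 1 by omega,
                  pvStep_origin fuel hget ⟨rfl, rfl⟩]
            · -- a = 0, b = b' + 1 : single dependency (0, b')
              simp only [Nat.cast_zero] at hget ⊢
              have hcb : ((b' + 1 : Nat) : Int) - 1 = ((b' : Nat) : Int) := by push_cast; ring
              have hij : ¬ ((0 : Int) = 0 ∧ ((b' + 1 : Nat) : Int) = 0) := by push_cast; omega
              have hjne : ¬ (((b' + 1 : Nat) : Int) = 0) := by push_cast; omega
              cases hdep : memo.get? ((0 : Int), ((b' + 1 : Nat) : Int) - 1) with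
              | some u =>
                  have hu : u = pvBest down right 0 b' := hinv 0 b' u (by rw [← hcb]; simpa using hdep)
                  refine ⟨1, memo.insert ((0 : Int), ((b' + 1 : Nat) : Int))
                      (u + pvG2 right 0 (((b' + 1 : Nat) : Int) - 1)),
                    by have := pow3_ge_3 (s + 1); omega, ?_, ?_, get?_mono_insert hget, ?_⟩
                  · have := MInv_insert hinv 0 (b' + 1)
                      (v := u + pvG2 right 0 (((b' + 1 : Nat) : Int) - 1))
                      (by rw [hu, hcb]; simp [pvBest])
                    simpa using this
                  · rw [PySem.Dict.get?_insert_self, hu, hcb]; simp [pvBest]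
                  · intro rest fuel
                    rw [show (1 : Nat) + fuel = fuel + 1 by omega,
                      pvStep_i0_some fuel hget hij hjne rfl hdep]
              | none =>
                  obtain ⟨t1, memo1, ht1, hinv1, hget1, hmono1, hrun1⟩ :=
                    ih 0 b' (by omega) memo hinv
                  simp only [Nat.cast_zero] at hget1 hrun1
                  rw [← hcb] at hget1 hrun1
                  cases hre : memo1.get? ((0 : Int), ((b' + 1 : Nat) : Int)) with
                  | some w =>
                      refine ⟨1 + t1 + 1, memo1, by have := pow3_budget s; omega, hinv1, ?_, hmono1, ?_⟩
                      · rw [hre, hinv1 0 (b' + 1) w (by simpa using hre)]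
                      · intro rest fuel
                        rw [show (1 + t1 + 1) + fuel = (t1 + (fuel + 1)) + 1 by omega,
                          pvStep_i0_none _ hget hij hjne rfl hdep, hrun1, pvStep_hit fuel hre]
                  | none =>
                      refine ⟨1 + t1 + 1,
                        memo1.insert ((0 : Int), ((b' + 1 : Nat) : Int))
                          (pvBest down right 0 b' + pvG2 right 0 (((b' + 1 : Nat) : Int) - 1)),
                        by have := pow3_budget s; omega, ?_, ?_,
                        fun k v h => get?_mono_insert hre k v (hmono1 k v h), ?_⟩
                      · have := MInv_insert hinv1 0 (b' + 1)
                          (v := pvBest down right 0 b' + pvG2 right 0 (((b' + 1 : Nat) : Int) - 1))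
                          (by rw [hcb]; simp [pvBest])
                        simpa using this
                      · rw [PySem.Dict.get?_insert_self, hcb]; simp [pvBest]
                      · intro rest fuel
                        rw [show (1 + t1 + 1) + fuel = (t1 + (fuel + 1)) + 1 by omega,
                          pvStep_i0_none _ hget hij hjne rfl hdep, hrun1,
                          pvStep_i0_some fuel hre hij hjne rfl hget1]
          · rcases b with _ | b'
            · -- b = 0, a = a' + 1 : single dependency (a', 0)
              simp only [Nat.cast_zero] at hget ⊢
              have hca : ((a' + 1 : Nat) : Int) - 1 = ((a' : Nat) : Int) := by push_cast; ring
              have hij : ¬ (((a' + 1 : Nat) : Int) = 0 ∧ (0 : Int) = 0) := by push_cast; omega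
              cases hdep : memo.get? (((a' + 1 : Nat) : Int) - 1, (0 : Int)) with
              | some u =>
                  have hu : u = pvBest down right a' 0 := hinv a' 0 u (by rw [← hca]; simpa using hdep)
                  refine ⟨1, memo.insert (((a' + 1 : Nat) : Int), (0 : Int))
                      (u + pvG2 down (((a' + 1 : Nat) : Int) - 1) 0),
                    by have := pow3_ge_3 (s + 1); omega, ?_, ?_, get?_mono_insert hget, ?_⟩
                  · have := MInv_insert hinv (a' + 1) 0
                      (v := u + pvG2 down (((a' + 1 : Nat) : Int) - 1) 0)
                      (by rw [hu, hca]; simp [pvBest])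
                    simpa using this
                  · rw [PySem.Dict.get?_insert_self, hu, hca]; simp [pvBest]
                  · intro rest fuel
                    rw [show (1 : Nat) + fuel = fuel + 1 by omega,
                      pvStep_j0_some fuel hget hij rfl hdep]
              | none =>
                  obtain ⟨t1, memo1, ht1, hinv1, hget1, hmono1, hrun1⟩ :=
                    ih a' 0 (by omega) memo hinv
                  simp only [Nat.cast_zero] at hget1 hrun1
                  rw [← hca] at hget1 hrun1
                  cases hre : memo1.get? (((a' + 1 : Nat) : Int), (0 : Int)) with
                  | some w =>
                      refine ⟨1 + t1 + 1, memo1, by have := pow3_budget s; omega, hinv1, ?_, hmono1, ?_⟩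
                      · rw [hre, hinv1 (a' + 1) 0 w (by simpa using hre)]
                      · intro rest fuel
                        rw [show (1 + t1 + 1) + fuel = (t1 + (fuel + 1)) + 1 by omega,
                          pvStep_j0_none _ hget hij rfl hdep, hrun1, pvStep_hit fuel hre]
                  | none =>
                      refine ⟨1 + t1 + 1,
                        memo1.insert (((a' + 1 : Nat) : Int), (0 : Int))
                          (pvBest down right a' 0 + pvG2 down (((a' + 1 : Nat) : Int) - 1) 0),
                        by have := pow3_budget s; omega, ?_, ?_,
                        fun k v h => get?_mono_insert hre k v (hmono1 k v h), ?_⟩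
                      · have := MInv_insert hinv1 (a' + 1) 0
                          (v := pvBest down right a' 0 + pvG2 down (((a' + 1 : Nat) : Int) - 1) 0)
                          (by rw [hca]; simp [pvBest])
                        simpa using this
                      · rw [PySem.Dict.get?_insert_self, hca]; simp [pvBest]
                      · intro rest fuel
                        rw [show (1 + t1 + 1) + fuel = (t1 + (fuel + 1)) + 1 by omega,
                          pvStep_j0_none _ hget hij rfl hdep, hrun1,
                          pvStep_j0_some fuel hre hij rfl hget1]
            · -- interior cell (a' + 1, b' + 1)
              have hca : ((a' + 1 : Nat) : Int) - 1 = ((a' : Nat) : Int) := by push_cast; ring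
              have hcb : ((b' + 1 : Nat) : Int) - 1 = ((b' : Nat) : Int) := by push_cast; ring
              have hij : ¬ (((a' + 1 : Nat) : Int) = 0 ∧ ((b' + 1 : Nat) : Int) = 0) := by push_cast; omega
              have hjne : ¬ (((b' + 1 : Nat) : Int) = 0) := by push_cast; omega
              have hine : ¬ (((a' + 1 : Nat) : Int) = 0) := by push_cast; omega
              have key : ∀ memo2 : PySem.Dict (Int × Int) Int, MInv down right memo2 →
                  memo2.get? (((a' + 1 : Nat) : Int) - 1, ((b' + 1 : Nat) : Int)) = some (pvBest down right a' (b' + 1)) →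
                  memo2.get? (((a' + 1 : Nat) : Int), ((b' + 1 : Nat) : Int) - 1) = some (pvBest down right (a' + 1) b') →
                  memo2.get? (((a' + 1 : Nat) : Int), ((b' + 1 : Nat) : Int)) = none →
                  MInv down right (memo2.insert (((a' + 1 : Nat) : Int), ((b' + 1 : Nat) : Int))
                    (max (pvBest down right a' (b' + 1) + pvG2 down (((a' + 1 : Nat) : Int) - 1) (((b' + 1 : Nat) : Int)))
                         (pvBest down right (a' + 1) b' + pvG2 right (((a' + 1 : Nat) : Int)) (((b' + 1 : Nat) : Int) - 1)))) := by
                intro memo2 hinv2 _ _ _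
                exact MInv_insert hinv2 (a' + 1) (b' + 1) (by rw [hca, hcb]; simp [pvBest])
              cases hup : memo.get? (((a' + 1 : Nat) : Int) - 1, ((b' + 1 : Nat) : Int)) with
              | some u =>
                  have hu : u = pvBest down right a' (b' + 1) :=
                    hinv a' (b' + 1) u (by rw [← hca]; exact hup)
                  cases hleft : memo.get? (((a' + 1 : Nat) : Int), ((b' + 1 : Nat) : Int) - 1) with
                  | some l =>
                      have hl : l = pvBest down right (a' + 1) b' :=
                        hinv (a' + 1) b' l (by rw [← hcb]; exact hleft)
                      refine ⟨1, _, by have := pow3_ge_3 (s + 1); omega,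
                        key memo hinv (hu ▸ hup) (hl ▸ hleft) hget, ?_,
                        get?_mono_insert hget, ?_⟩
                      · rw [PySem.Dict.get?_insert_self, hca, hcb]; simp [pvBest]
                      · intro rest fuel
                        rw [show (1 : Nat) + fuel = fuel + 1 by omega,
                          pvStep_int_both fuel hget hij hjne hine hup hleft, hu, hl]
                  | none =>
                      obtain ⟨t1, memo1, ht1, hinv1, hget1, hmono1, hrun1⟩ :=
                        ih (a' + 1) b' (by omega) memo hinv
                      rw [← hcb] at hget1 hrun1
                      have hup1 := hmono1 _ _ hup
                      cases hre : memo1.get? (((a' + 1 : Nat) : Int), ((b' + 1 : Nat) : Int)) with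
                      | some w =>
                          refine ⟨1 + t1 + 1, memo1, by have := pow3_budget s; omega, hinv1, ?_, hmono1, ?_⟩
                          · rw [hre, hinv1 (a' + 1) (b' + 1) w hre]
                          · intro rest fuel
                            rw [show (1 + t1 + 1) + fuel = (t1 + (fuel + 1)) + 1 by omega,
                              pvStep_int_leftNone _ hget hij hjne hine hup hleft, hrun1,
                              pvStep_hit fuel hre]
                      | none =>
                          have hu1 : memo1.get? (((a' + 1 : Nat) : Int) - 1, ((b' + 1 : Nat) : Int))
                              = some (pvBest down right a' (b' + 1)) := by rw [hup1, hu]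
                          refine ⟨1 + t1 + 1, _, by have := pow3_budget s; omega,
                            key memo1 hinv1 hu1 hget1 hre, ?_,
                            fun k v h => get?_mono_insert hre k v (hmono1 k v h), ?_⟩
                          · rw [PySem.Dict.get?_insert_self, hca, hcb]; simp [pvBest]
                          · intro rest fuel
                            rw [show (1 + t1 + 1) + fuel = (t1 + (fuel + 1)) + 1 by omega,
                              pvStep_int_leftNone _ hget hij hjne hine hup hleft, hrun1,
                              pvStep_int_both fuel hre hij hjne hine hu1 hget1]
              | none =>
                  cases hleft : memo.get? (((a' + 1 : Nat) : Int), ((b' + 1 : Nat) : Int) - 1) with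
                  | some l =>
                      obtain ⟨t1, memo1, ht1, hinv1, hget1, hmono1, hrun1⟩ :=
                        ih a' (b' + 1) (by omega) memo hinv
                      rw [← hca] at hget1 hrun1
                      have hleft1 := hmono1 _ _ hleft
                      have hl : l = pvBest down right (a' + 1) b' :=
                        hinv (a' + 1) b' l (by rw [← hcb]; exact hleft)
                      cases hre : memo1.get? (((a' + 1 : Nat) : Int), ((b' + 1 : Nat) : Int)) with
                      | some w =>
                          refine ⟨1 + t1 + 1, memo1, by have := pow3_budget s; omega, hinv1, ?_, hmono1, ?_⟩
                          · rw [hre, hinv1 (a' + 1) (b' + 1) w hre]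
                          · intro rest fuel
                            rw [show (1 + t1 + 1) + fuel = (t1 + (fuel + 1)) + 1 by omega,
                              pvStep_int_upNone _ hget hij hjne hine hup hleft, hrun1,
                              pvStep_hit fuel hre]
                      | none =>
                          have hl1 : memo1.get? (((a' + 1 : Nat) : Int), ((b' + 1 : Nat) : Int) - 1)
                              = some (pvBest down right (a' + 1) b') := by rw [hleft1, hl]
                          refine ⟨1 + t1 + 1, _, by have := pow3_budget s; omega,
                            key memo1 hinv1 hget1 hl1 hre, ?_,
                            fun k v h => get?_mono_insert hre k v (hmono1 k v h), ?_⟩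
                          · rw [PySem.Dict.get?_insert_self, hca, hcb]; simp [pvBest]
                          · intro rest fuel
                            rw [show (1 + t1 + 1) + fuel = (t1 + (fuel + 1)) + 1 by omega,
                              pvStep_int_upNone _ hget hij hjne hine hup hleft, hrun1,
                              pvStep_int_both fuel hre hij hjne hine hget1 hl1]
                  | none =>
                      -- both deps pushed; the left dep (i, j-1) is on top, resolved first
                      obtain ⟨t1, memo1, ht1, hinv1, hget1, hmono1, hrun1⟩ :=
                        ih (a' + 1) b' (by omega) memo hinv
                      rw [← hcb] at hget1 hrun1
                      obtain ⟨t2, memo2, ht2, hinv2, hget2, hmono2, hrun2⟩ :=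
                        ih a' (b' + 1) (by omega) memo1 hinv1
                      rw [← hca] at hget2 hrun2
                      have hleft2 := hmono2 _ _ hget1
                      cases hre : memo2.get? (((a' + 1 : Nat) : Int), ((b' + 1 : Nat) : Int)) with
                      | some w =>
                          refine ⟨1 + t1 + t2 + 1, memo2, by have := pow3_budget s; omega, hinv2, ?_,
                            fun k v h => hmono2 k v (hmono1 k v h), ?_⟩
                          · rw [hre, hinv2 (a' + 1) (b' + 1) w hre]
                          · intro rest fuel
                            rw [show (1 + t1 + t2 + 1) + fuel = (t1 + (t2 + (fuel + 1))) + 1 by omega,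
                              pvStep_int_noneNone _ hget hij hjne hine hup hleft, hrun1, hrun2,
                              pvStep_hit fuel hre]
                      | none =>
                          refine ⟨1 + t1 + t2 + 1, _, by have := pow3_budget s; omega,
                            key memo2 hinv2 hget2 hleft2 hre, ?_,
                            fun k v h => get?_mono_insert hre k v (hmono2 k v (hmono1 k v h)), ?_⟩
                          · rw [PySem.Dict.get?_insert_self, hca, hcb]; simp [pvBest]
                          · intro rest fuel
                            rw [show (1 + t1 + t2 + 1) + fuel = (t1 + (t2 + (fuel + 1))) + 1 by omega,
                              pvStep_int_noneNone _ hget hij hjne hine hup hleft, hrun1, hrun2,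
                              pvStep_int_both fuel hre hij hjne hine hget2 hleft2]

lemma alt_eq_best (N M : ℕ) (down right : List (List Int)) :
    manhattanTourist_alt (N:Int) (M:Int) down right = pvBest down right N M := by
  obtain ⟨t, memo', ht, hinv, hget, hmono, hrun⟩ :=
    pvResolve down right (N + M) N M le_rfl PySem.Dict.empty
      (by intro a b v h; rw [PySem.Dict.get?_empty] at h; cases h)
  unfold manhattanTourist_alt
  have hfuel : (((N:Int)).toNat + ((M:Int)).toNat + 1) = N + M + 1 := by simp
  rw [hfuel]
  have hle : t ≤ 3 ^ (N + M + 1) := by omega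
  have hsplit : 3 ^ (N + M + 1) = t + (3 ^ (N + M + 1) - t) := by omega
  rw [hsplit, hrun, pvLoop_nil, PySem.Dict.getD_eq_get?_getD, hget]
  rfl

-- ===== A-side proof =====
lemma pyRange_one_nat' (N : ℕ) :
    PySem.List.pyRange 1 (((N+1 : ℕ)):Int) 1 = (List.range N).map (fun k : ℕ => 1 + (k:Int)) := by
  rw [← pyRange_one_nat]
  norm_num

lemma set_map_range' {α} (f : ℕ → α) {N : ℕ} (t : ℕ) (v : α) :
    ((List.range N).map f).set t v = (List.range N).map (fun i => if i = t then v else f i) := by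
  apply List.ext_getElem
  · simp
  · intro i h1 h2
    simp only [List.getElem_set, List.getElem_map, List.getElem_range]
    simp at h2
    by_cases hit : t = i <;> simp [hit]
    · intro h; exact absurd h.symm hit

lemma map_congr_range {α} {f g : ℕ → α} {N : ℕ} (h : ∀ i, i < N → f i = g i) :
    (List.range N).map f = (List.range N).map g :=
  List.map_congr_left (fun a ha => h a (List.mem_range.mp ha))

lemma map_range_succ_left {α} (f : ℕ → α) (M : ℕ) :
    (List.range (M+1)).map f = f 0 :: (List.range M).map (fun j => f (j+1)) := by
  rw [List.range_succ_eq_map]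
  simp [List.map_map]

lemma pvG2_mr (F : ℕ → List Int) (N' i j : ℕ) (hi : i < N') :
    pvG2 ((List.range N').map F) (i:Int) (j:Int) = (F i).getD j 0 := by
  unfold pvG2
  rw [PySem.List.pyGetD_natCast, PySem.List.pyGetD_natCast, getD_map_range' _ _ hi]

lemma pvG2_mr0 (F : ℕ → List Int) (N' j : ℕ) (hi : 0 < N') :
    pvG2 ((List.range N').map F) 0 (j:Int) = (F 0).getD j 0 := by
  unfold pvG2
  rw [PySem.List.pyGetD_zero, PySem.List.pyGetD_natCast, getD_map_range' _ _ hi]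

lemma pvS2_mr (F : ℕ → List Int) (N' i j : ℕ) (v : Int) (hi : i < N') :
    pvS2 ((List.range N').map F) (i:Int) (j:Int) v
      = (List.range N').map (fun i' => if i' = i then (F i).set j v else F i') := by
  unfold pvS2
  rw [PySem.List.pyGetD_natCast, PySem.List.pySetD_natCast, PySem.List.pySetD_natCast,
    getD_map_range' _ _ hi, set_map_range']

lemma pvS2_mr0 (F : ℕ → List Int) (N' j : ℕ) (v : Int) (hi : 0 < N') :
    pvS2 ((List.range N').map F) 0 (j:Int) v
      = (List.range N').map (fun i' => if i' = 0 then (F 0).set j v else F i') := by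
  unfold pvS2
  rw [PySem.List.pyGetD_zero, PySem.List.pySetD_natCast]
  rw [show (0:Int) = ((0:ℕ):Int) from rfl]
  rw [PySem.List.pySetD_natCast, getD_map_range' _ _ hi, set_map_range']

lemma pvS2_mr00 (F : ℕ → List Int) (N' : ℕ) (v : Int) (hi : 0 < N') :
    pvS2 ((List.range N').map F) 0 0 v
      = (List.range N').map (fun i' => if i' = 0 then (F 0).set 0 v else F i') := by
  unfold pvS2
  rw [PySem.List.pyGetD_zero]
  rw [show (0:Int) = ((0:ℕ):Int) from rfl]
  simp only [PySem.List.pySetD_natCast]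
  rw [getD_map_range' _ _ hi, set_map_range']

-- invariant shapes
def colMat (down right : List (List Int)) (N M k : ℕ) : List (List Int) :=
  (List.range (N+1)).map (fun i => (if i ≤ k then pvBest down right i 0 else 0) :: List.replicate M 0)

def rowP (down right : List (List Int)) (M i t : ℕ) : List Int :=
  (List.range (M+1)).map (fun j => if j ≤ t then pvBest down right i j else 0)

def mat2 (down right : List (List Int)) (N M t : ℕ) : List (List Int) :=
  (List.range (N+1)).map (fun i => if i = 0 then rowP down right M 0 t else pvBest down right i 0 :: List.replicate M 0)

def mat3 (down right : List (List Int)) (N M k : ℕ) : List (List Int) :=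
  (List.range (N+1)).map (fun i => if i ≤ k then rowS down right M i else pvBest down right i 0 :: List.replicate M 0)

def mat3in (down right : List (List Int)) (N M k t : ℕ) : List (List Int) :=
  (List.range (N+1)).map (fun i => if i ≤ k then rowS down right M i
    else if i = k+1 then rowP down right M (k+1) t else pvBest down right i 0 :: List.replicate M 0)

lemma rowP_zero (down right : List (List Int)) (M i : ℕ) :
    rowP down right M i 0 = pvBest down right i 0 :: List.replicate M 0 := by
  unfold rowP
  rw [map_range_succ_left]
  simp

lemma rowP_full (down right : List (List Int)) (M i : ℕ) :
    rowP down right M i M = rowS down right M i := by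
  unfold rowP rowS
  exact map_congr_range (fun j hj => by simp [Nat.lt_succ_iff.mp hj])

lemma rowP_step (down right : List (List Int)) (M i t : ℕ) (_ht : t < M) (v : Int)
    (hv : v = pvBest down right i (t+1)) :
    (rowP down right M i t).set (t+1) v = rowP down right M i (t+1) := by
  unfold rowP
  rw [set_map_range']
  apply map_congr_range
  intro j hj
  by_cases hjt : j = t + 1
  · simp [hjt, hv]
  · have : (j ≤ t + 1) ↔ (j ≤ t) := by omega
    simp [hjt, this]

lemma rowP_getD (down right : List (List Int)) (M i t j : ℕ) (hj : j < M + 1) (hjt : j ≤ t) :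
    (rowP down right M i t).getD j 0 = pvBest down right i j := by
  unfold rowP
  rw [getD_map_range' _ _ hj]
  simp [hjt]

lemma rowS_getD (down right : List (List Int)) (M i j : ℕ) (hj : j < M + 1) :
    (rowS down right M i).getD j 0 = pvBest down right i j := by
  unfold rowS
  rw [getD_map_range' _ _ hj]

lemma phase0 (down right : List (List Int)) (N M : ℕ) :
    pvS2 ((List.range (N+1)).map (fun _ => (List.range (M+1)).map (fun _ => (0:Int)))) 0 0 0
      = colMat down right N M 0 := by
  rw [pvS2_mr00 _ _ _ (by omega)]
  unfold colMat
  apply map_congr_range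
  intro i hi
  have hc : (List.range (M+1)).map (fun _ : ℕ => (0:Int)) = 0 :: List.replicate M 0 := by
    rw [map_range_succ_left]
    simp [List.map_const']
  by_cases h0 : i = 0
  · subst h0
    simp [hc, pvBest, List.set_cons_zero]
  · simp [h0, hc]

lemma phase1 (down right : List (List Int)) (N M : ℕ) :
    (List.range N).foldl
      (fun mat (k : ℕ) => pvS2 mat (1+(k:Int)) 0 (pvG2 mat (1+(k:Int)-1) 0 + pvG2 down (1+(k:Int)-1) 0))
      (colMat down right N M 0) = colMat down right N M N := by
  exact foldl_range_inv
    (f := fun mat (k : ℕ) => pvS2 mat (1+(k:Int)) 0 (pvG2 mat (1+(k:Int)-1) 0 + pvG2 down (1+(k:Int)-1) 0))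
    (g := fun k => colMat down right N M k) N
    (fun k hk => by
      beta_reduce
      have e1 : (1+(k:Int)-1) = ((k:ℕ):Int) := by omega
      have e4 : (1+(k:Int)) = ((k+1 : ℕ) : Int) := by omega
      have h0 : (0:Int) = ((0:ℕ):Int) := by simp
      rw [e1, e4]
      unfold colMat
      rw [h0, pvG2_mr _ _ _ _ (by omega), pvS2_mr _ _ _ _ _ (by omega)]
      apply map_congr_range
      intro i hi
      by_cases hik : i = k + 1
      · subst hik
        simp only [reduceIte, if_neg (show ¬ k+1 ≤ k by omega), List.getD_cons_zero,
          List.set_cons_zero]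
        simp [pvBest]
      · have h2 : (i ≤ k + 1) ↔ (i ≤ k) := by omega
        simp [hik, h2])

lemma phase2 (down right : List (List Int)) (N M : ℕ) :
    (List.range M).foldl
      (fun mat (t : ℕ) => pvS2 mat 0 (1+(t:Int)) (pvG2 mat 0 (1+(t:Int)-1) + pvG2 right 0 (1+(t:Int)-1)))
      (colMat down right N M N) = mat2 down right N M M := by
  have base : colMat down right N M N = mat2 down right N M 0 := by
    unfold colMat mat2
    apply map_congr_range
    intro i hi
    by_cases h0 : i = 0
    · subst h0; simp [rowP_zero]
    · simp [h0, (by omega : i ≤ N)]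
  rw [base]
  exact foldl_range_inv
    (f := fun mat (t : ℕ) => pvS2 mat 0 (1+(t:Int)) (pvG2 mat 0 (1+(t:Int)-1) + pvG2 right 0 (1+(t:Int)-1)))
    (g := fun t => mat2 down right N M t) M
    (fun t ht => by
      beta_reduce
      have e3 : (1+(t:Int)-1) = ((t:ℕ):Int) := by omega
      have e2 : (1+(t:Int)) = ((t+1 : ℕ) : Int) := by omega
      rw [e3, e2]
      unfold mat2
      rw [pvG2_mr0 _ _ _ (by omega), pvS2_mr0 _ _ _ _ (by omega)]
      apply map_congr_range
      intro i hi
      by_cases h0 : i = 0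
      · subst h0
        simp only [reduceIte]
        rw [rowP_getD down right M 0 t t (by omega) (le_refl t)]
        rw [rowP_step down right M 0 t ht _ (by simp [pvBest])]
      · simp [h0])

lemma phase3_inner (down right : List (List Int)) (N M k : ℕ) (hk : k < N) :
    (List.range M).foldl
      (fun mat (t : ℕ) => pvS2 mat (1+(k:Int)) (1+(t:Int))
        (max (pvG2 mat (1+(k:Int)-1) (1+(t:Int)) + pvG2 down (1+(k:Int)-1) (1+(t:Int)))
             (pvG2 mat (1+(k:Int)) (1+(t:Int)-1) + pvG2 right (1+(k:Int)) (1+(t:Int)-1))))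
      (mat3 down right N M k) = mat3 down right N M (k+1) := by
  have base : mat3 down right N M k = mat3in down right N M k 0 := by
    unfold mat3 mat3in
    apply map_congr_range
    intro i hi
    by_cases hle : i ≤ k
    · simp [hle]
    · by_cases hik : i = k+1
      · simp [hik, rowP_zero]
      · simp [hle, hik]
  have final : mat3in down right N M k M = mat3 down right N M (k+1) := by
    unfold mat3 mat3in
    apply map_congr_range
    intro i hi
    by_cases hle : i ≤ k
    · simp [hle, (by omega : i ≤ k+1)]
    · by_cases hik : i = k+1
      · simp [hik, rowP_full]
      · simp only [if_neg hle, if_neg hik, if_neg (show ¬ i ≤ k+1 by omega)]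
  rw [base, ← final]
  exact foldl_range_inv
    (f := fun mat (t : ℕ) => pvS2 mat (1+(k:Int)) (1+(t:Int))
        (max (pvG2 mat (1+(k:Int)-1) (1+(t:Int)) + pvG2 down (1+(k:Int)-1) (1+(t:Int)))
             (pvG2 mat (1+(k:Int)) (1+(t:Int)-1) + pvG2 right (1+(k:Int)) (1+(t:Int)-1))))
    (g := fun t => mat3in down right N M k t) M
    (fun t ht => by
      beta_reduce
      have e1 : (1+(k:Int)-1) = ((k:ℕ):Int) := by omega
      have e3 : (1+(t:Int)-1) = ((t:ℕ):Int) := by omega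
      have e2 : (1+(t:Int)) = ((t+1 : ℕ) : Int) := by omega
      have e4 : (1+(k:Int)) = ((k+1 : ℕ) : Int) := by omega
      rw [e1, e3, e2, e4]
      unfold mat3in
      rw [pvG2_mr _ _ _ _ (by omega), pvG2_mr _ _ _ _ (by omega), pvS2_mr _ _ _ _ _ (by omega)]
      have hFk : (if k ≤ k then rowS down right M k
          else if k = k+1 then rowP down right M (k+1) t else pvBest down right k 0 :: List.replicate M 0)
          = rowS down right M k := by simp
      have hFk1 : (if k+1 ≤ k then rowS down right M (k+1)
          else if k+1 = k+1 then rowP down right M (k+1) t else pvBest down right (k+1) 0 :: List.replicate M 0)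
          = rowP down right M (k+1) t := by simp
      rw [hFk, hFk1, rowS_getD down right M k (t+1) (by omega),
        rowP_getD down right M (k+1) t t (by omega) (le_refl t)]
      apply map_congr_range
      intro i hi
      by_cases hik : i = k+1
      · subst hik
        simp only [reduceIte, if_neg (show ¬ k+1 ≤ k by omega)]
        rw [rowP_step down right M (k+1) t ht _ (by simp [pvBest])]
      · simp [hik])

lemma phase3 (down right : List (List Int)) (N M : ℕ) :
    (List.range N).foldl
      (fun mat (k : ℕ) => (List.range M).foldl
        (fun mat (t : ℕ) => pvS2 mat (1+(k:Int)) (1+(t:Int))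
          (max (pvG2 mat (1+(k:Int)-1) (1+(t:Int)) + pvG2 down (1+(k:Int)-1) (1+(t:Int)))
               (pvG2 mat (1+(k:Int)) (1+(t:Int)-1) + pvG2 right (1+(k:Int)) (1+(t:Int)-1)))) mat)
      (mat2 down right N M M) = mat3 down right N M N := by
  have base : mat2 down right N M M = mat3 down right N M 0 := by
    unfold mat2 mat3
    apply map_congr_range
    intro i hi
    by_cases h0 : i = 0
    · subst h0; simp [rowP_full]
    · simp [h0]
  rw [base]
  exact foldl_range_inv
    (f := fun mat (k : ℕ) => (List.range M).foldl
        (fun mat (t : ℕ) => pvS2 mat (1+(k:Int)) (1+(t:Int))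
          (max (pvG2 mat (1+(k:Int)-1) (1+(t:Int)) + pvG2 down (1+(k:Int)-1) (1+(t:Int)))
               (pvG2 mat (1+(k:Int)) (1+(t:Int)-1) + pvG2 right (1+(k:Int)) (1+(t:Int)-1)))) mat)
    (g := fun k => mat3 down right N M k) N
    (fun k hk => by beta_reduce; exact phase3_inner down right N M k hk)

lemma a_eq_best (N M : ℕ) (down right : List (List Int)) :
    manhattanTourist (N:Int) (M:Int) down right = pvBest down right N M := by
  unfold manhattanTourist
  have cN : ((N:Int)+1) = ((N+1 : ℕ):Int) := by omega
  have cM : ((M:Int)+1) = ((M+1 : ℕ):Int) := by omega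
  simp only [cN, cM, pyRange_zero_nat, pyRange_one_nat', List.foldl_map, List.map_map,
    Function.comp_def]
  rw [phase0 down right N M, phase1 down right N M, phase2 down right N M, phase3 down right N M]
  unfold mat3
  unfold pvG2
  rw [PySem.List.pyGetD_natCast, PySem.List.pyGetD_natCast, getD_map_range' _ _ (by omega)]
  simp only [if_pos (le_refl N)]
  unfold rowS
  rw [getD_map_range' _ _ (by omega)]

-- ===== VERDICT (by name: the statement is the Claim_ definition above) =====
theorem manhattanTourist_spec : Claim_equal_manhattanTourist := by
  intro n m down right hdom hpre
  unfold Spec_manhattanTourist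
  have h := hpre
  unfold Pre_manhattanTourist at h
  obtain ⟨hn, hm, -⟩ := h
  lift n to ℕ using hn
  lift m to ℕ using hm
  rw [a_eq_best, alt_eq_best]
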